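-- pv_equiv track=rewrite | github.com/icode100/LeetCode_Practice | Striver_SDE_SHEET/4257-sum-of-sortable-integers/sum-of-sortable-integers.py | sortableIntegers
-- ===== SOURCE A (Python) =====
-- def sortableIntegers(nums: list[int]) -> int:
--     N = len(nums)
--     def check(k):
--         mini = 0
--         for i in range(0,N,k):
--             if nums[i]<mini: return False
--             miss = 0
--             maxi = nums[i]
--             for j in range(i+1,i+k):
--                 maxi = max(maxi,nums[j])
--                 if nums[j]<mini: return False
--                 if nums[j]<nums[j-1]:
--                     miss+=1
--                     if miss>1: return False
--             if nums[i] < nums[i + k - 1]: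
--                 miss += 1
--                 if miss > 1:
--                     return False
--             mini = maxi
--         return True
--     count = 0
--     for k in range(1,N+1):
--         if N%k==0 and check(k):
--             count+=k
--     return count
-- ===== SOURCE B (Python) =====
-- def sortableIntegers(nums: list[int]) -> int:
--     N = len(nums)
--     # prefix descent counts: D[m] = number of positions t with 1 <= t <= m-1 and nums[t] < nums[t-1]
--     D = [0] * (N + 1)
--     for t in range(1, N):
--         D[t + 1] = D[t] + (1 if nums[t] < nums[t - 1] else 0)
--
--     def ok(k):
--         prev = 0
--         for i in range(0, N, k):
--             block = nums[i:i + k]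
--             if min(block) < prev:
--                 return False
--             if D[i + k] - D[i + 1] + (1 if nums[i] < nums[i + k - 1] else 0) > 1:
--                 return False
--             prev = max(block)
--         return True
--
--     return sum(k for k in range(1, N + 1) if N % k == 0 and ok(k))
-- ===== Notes on version B (the rewrite author's own statement) =====
-- stated objective: alternative
-- what changed: B precomputes a global prefix-sum array of descent positions once and tests each block via slice min/max plus a prefix-sum difference, instead of A's per-element scan per block that threads a running max and a miss counter with early returns.
import Mathlib
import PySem

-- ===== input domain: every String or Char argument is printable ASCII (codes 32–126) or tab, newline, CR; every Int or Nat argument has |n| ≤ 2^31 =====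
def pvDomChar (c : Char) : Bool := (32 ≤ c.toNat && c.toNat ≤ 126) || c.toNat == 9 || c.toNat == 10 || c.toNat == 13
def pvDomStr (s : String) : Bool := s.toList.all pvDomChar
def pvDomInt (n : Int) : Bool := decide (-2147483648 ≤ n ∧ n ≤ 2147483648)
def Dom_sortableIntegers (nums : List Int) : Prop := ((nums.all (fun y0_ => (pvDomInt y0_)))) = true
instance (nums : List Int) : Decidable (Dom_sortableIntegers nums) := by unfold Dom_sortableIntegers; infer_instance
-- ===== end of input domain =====

-- B replaces A's per-element block scan (running max, miss counter, early returns) by a global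
-- prefix array of descent counts plus per-block slice min/max tests; objective: alternative decomposition.

-- ===== PORT A =====
def aInnerStep (nums : List Int) (mini : Int) (s : Option (Int × Int)) (j : Int) :
    Option (Int × Int) :=
  match s with
  | none => none
  | some (miss, maxi) =>
    let nj := PySem.List.pyGetD nums j 0
    let maxi2 := max maxi nj
    if nj < mini then none
    else if nj < PySem.List.pyGetD nums (j-1) 0 then
      if miss + 1 > 1 then none else some (miss + 1, maxi2)
    else some (miss, maxi2)

def aBlockStep (nums : List Int) (k : Int) (st : Option Int) (i : Int) : Option Int :=
  match st with
  | none => none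
  | some mini =>
    let ni := PySem.List.pyGetD nums i 0
    if ni < mini then none
    else
      match (PySem.List.pyRange (i+1) (i+k) 1).foldl (aInnerStep nums mini) (some (0, ni)) with
      | none => none
      | some (miss, maxi) =>
        if ni < PySem.List.pyGetD nums (i+k-1) 0 then
          if miss + 1 > 1 then none else some maxi
        else some maxi

def aCheck (nums : List Int) (k : Int) : Bool :=
  ((PySem.List.pyRange 0 (PySem.List.len nums) k).foldl (aBlockStep nums k) (some 0)).isSome

def sortableIntegers (nums : List Int) : Int :=
  let N := PySem.List.len nums
  (PySem.List.pyRange 1 (N+1) 1).foldl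
    (fun count k => if PySem.Int.mod N k == 0 && aCheck nums k then count + k else count) 0

-- ===== PORT B =====
def bDStep (nums : List Int) (D : List Int) (t : Int) : List Int :=
  PySem.List.pySetD D (t+1)
    (PySem.List.pyGetD D t 0 +
      (if PySem.List.pyGetD nums t 0 < PySem.List.pyGetD nums (t-1) 0 then 1 else 0))

def bDArr (nums : List Int) : List Int :=
  (PySem.List.pyRange 1 (PySem.List.len nums) 1).foldl (bDStep nums)
    (List.replicate (nums.length + 1) (0 : Int))

def bBlockStep (nums : List Int) (D : List Int) (k : Int) (st : Option Int) (i : Int) :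
    Option Int :=
  match st with
  | none => none
  | some prev =>
    let block := PySem.List.slice nums (some i) (some (i+k))
    if (PySem.List.min? block (fun y => y)).getD 0 < prev then none
    else if PySem.List.pyGetD D (i+k) 0 - PySem.List.pyGetD D (i+1) 0 +
        (if PySem.List.pyGetD nums i 0 < PySem.List.pyGetD nums (i+k-1) 0 then 1 else 0) > 1
      then none
    else some ((PySem.List.max? block (fun y => y)).getD 0)

def bOk (nums : List Int) (D : List Int) (k : Int) : Bool :=
  ((PySem.List.pyRange 0 (PySem.List.len nums) k).foldl (bBlockStep nums D k) (some 0)).isSome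

def sortableIntegers_alt (nums : List Int) : Int :=
  let N := PySem.List.len nums
  let D := bDArr nums
  (PySem.List.pyRange 1 (N+1) 1).foldl
    (fun acc k => if PySem.Int.mod N k == 0 && bOk nums D k then acc + k else acc) 0

-- ===== PRECONDITION & SPEC =====
def Spec_sortableIntegers (nums : List Int) (out : Int) : Prop := out = sortableIntegers_alt nums
instance (nums : List Int) (out : Int) : Decidable (Spec_sortableIntegers nums out) := by unfold Spec_sortableIntegers; infer_instance

-- ===== CLAIM (what is proved, stated in full; the proofs are below) =====
def Claim_equal_sortableIntegers : Prop := ∀ (nums : List Int), Dom_sortableIntegers nums → Spec_sortableIntegers nums (sortableIntegers nums)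

-- ===== LEMMAS AND PROOFS =====

def gI (nums : List Int) (j : Int) : Int := PySem.List.pyGetD nums j 0

def dct (nums : List Int) (a b : Int) : Int :=
  ((PySem.List.pyRange a b 1).countP (fun j => decide (gI nums j < gI nums (j-1))) : Int)

def mxR (nums : List Int) (a b : Int) (x : Int) : Int :=
  (PySem.List.pyRange a b 1).foldl (fun acc j => max acc (gI nums j)) x

def allGe (nums : List Int) (m a b : Int) : Bool :=
  (PySem.List.pyRange a b 1).all (fun j => decide (m ≤ gI nums j))

lemma foldl_none {α σ : Type} (f : Option σ → α → Option σ)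
    (h : ∀ x, f none x = none) (l : List α) : l.foldl f none = none := by
  induction l with
  | nil => rfl
  | cons x t ih => simp [List.foldl_cons, h x, ih]

lemma dct_nil (nums : List Int) (a b : Int) (h : b ≤ a) : dct nums a b = 0 := by
  simp [dct, PySem.List.pyRange_one_eq_nil h]

lemma dct_cons (nums : List Int) (a b : Int) (h : a < b) :
    dct nums a b = (if gI nums a < gI nums (a-1) then 1 else 0) + dct nums (a+1) b := by
  rw [dct, PySem.List.pyRange_one_cons h, List.countP_cons, dct]
  by_cases hd : gI nums a < gI nums (a-1) <;> simp [hd] <;> push_cast <;> ring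

lemma dct_nonneg (nums : List Int) (a b : Int) : 0 ≤ dct nums a b := by
  simp [dct]

lemma dct_split (nums : List Int) (a m b : Int) (h1 : a ≤ m) (h2 : m ≤ b) :
    dct nums a b = dct nums a m + dct nums m b := by
  rw [dct, PySem.List.pyRange_one_append a m b h1 h2]
  simp [dct, List.countP_append]

lemma mxR_cons (nums : List Int) (a b x : Int) (h : a < b) :
    mxR nums a b x = mxR nums (a+1) b (max x (gI nums a)) := by
  rw [mxR, PySem.List.pyRange_one_cons h]; rfl

lemma allGe_cons (nums : List Int) (m a b : Int) (h : a < b) :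
    allGe nums m a b = (decide (m ≤ gI nums a) && allGe nums m (a+1) b) := by
  rw [allGe, PySem.List.pyRange_one_cons h]; simp [allGe]

lemma inner_char (nums : List Int) (mini : Int) : ∀ (n : Nat) (a b m mx : Int), (b - a).toNat = n → m ≤ 1 → a ≤ b →
    (PySem.List.pyRange a b 1).foldl (aInnerStep nums mini) (some (m, mx)) =
      (if allGe nums mini a b && decide (m + dct nums a b ≤ 1)
      then some (m + dct nums a b, mxR nums a b mx) else none) := by
  intro n
  induction n with
  | zero =>
    intro a b m mx hn hm hab
    have hba : b ≤ a := by omega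
    simp [PySem.List.pyRange_one_eq_nil hba, allGe, dct_nil nums a b hba, hm, mxR]
  | succ n ih =>
    intro a b m mx hn hm hab
    have hlt : a < b := by omega
    rw [PySem.List.pyRange_one_cons hlt, List.foldl_cons]
    rw [allGe_cons nums mini a b hlt, dct_cons nums a b hlt, mxR_cons nums a b mx hlt]
    by_cases h1 : gI nums a < mini
    · have hstep : aInnerStep nums mini (some (m, mx)) a = none := by
        simp only [aInnerStep]
        rw [if_pos (show PySem.List.pyGetD nums a 0 < mini from h1)]
      rw [hstep, foldl_none _ (fun x => rfl)]
      have hx : ¬ (mini ≤ gI nums a) := by omega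
      simp [hx]
    · have hge : mini ≤ gI nums a := by omega
      by_cases h2 : gI nums a < gI nums (a-1)
      · by_cases h3 : m + 1 > 1
        · have hstep : aInnerStep nums mini (some (m, mx)) a = none := by
            simp only [aInnerStep]
            rw [if_neg (show ¬ PySem.List.pyGetD nums a 0 < mini from h1),
                if_pos (show PySem.List.pyGetD nums a 0 < PySem.List.pyGetD nums (a-1) 0 from h2),
                if_pos h3]
          rw [hstep, foldl_none _ (fun x => rfl)]
          have hd := dct_nonneg nums (a+1) b
          simp [h2, show ¬ (m + (1 + dct nums (a+1) b) ≤ 1) from by omega]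
        · have hstep : aInnerStep nums mini (some (m, mx)) a
              = some (m + 1, max mx (gI nums a)) := by
            simp only [aInnerStep]
            rw [if_neg (show ¬ PySem.List.pyGetD nums a 0 < mini from h1),
                if_pos (show PySem.List.pyGetD nums a 0 < PySem.List.pyGetD nums (a-1) 0 from h2),
                if_neg h3]
            rfl
          rw [hstep, ih (a+1) b (m+1) (max mx (gI nums a)) (by omega) (by omega) (by omega)]
          simp [hge, h2, show m + (1 + dct nums (a+1) b) = m + 1 + dct nums (a+1) b from by ring]
      · have hstep : aInnerStep nums mini (some (m, mx)) a
            = some (m, max mx (gI nums a)) := by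
          simp only [aInnerStep]
          rw [if_neg (show ¬ PySem.List.pyGetD nums a 0 < mini from h1),
              if_neg (show ¬ PySem.List.pyGetD nums a 0 < PySem.List.pyGetD nums (a-1) 0 from h2)]
          rfl
        rw [hstep, ih (a+1) b m (max mx (gI nums a)) (by omega) hm (by omega)]
        simp [hge, h2]

lemma aStep_char (nums : List Int) (k mini i : Int) (hk : 1 ≤ k) :
    aBlockStep nums k (some mini) i =
      if allGe nums mini i (i+k) &&
         decide (dct nums (i+1) (i+k) +
           (if gI nums i < gI nums (i+k-1) then 1 else 0) ≤ 1)
      then some (mxR nums (i+1) (i+k) (gI nums i)) else none := by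
  have hik : i < i+k := by omega
  simp only [aBlockStep]
  rw [inner_char nums mini ((i+k)-(i+1)).toNat (i+1) (i+k) 0 (PySem.List.pyGetD nums i 0) rfl
    (by omega) (by omega)]
  rw [allGe_cons nums mini i (i+k) hik]
  by_cases h1 : gI nums i < mini
  · rw [if_pos (show PySem.List.pyGetD nums i 0 < mini from h1)]
    simp [show ¬ mini ≤ gI nums i from by omega]
  · rw [if_neg (show ¬ PySem.List.pyGetD nums i 0 < mini from h1)]
    have hge : mini ≤ gI nums i := by omega
    by_cases h2 : allGe nums mini (i+1) (i+k) = true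
    · have hd0 := dct_nonneg nums (i+1) (i+k)
      by_cases h3 : dct nums (i+1) (i+k) ≤ 1
      · rw [if_pos (by simp [h2]; omega)]
        by_cases h4 : gI nums i < gI nums (i+k-1)
        · by_cases h5 : 0 < dct nums (i+1) (i+k)
          · simp only [gI] at h4 h5 ⊢
            rw [if_pos h4, if_pos (show (0:Int) + dct nums (i+1) (i+k) + 1 > 1 from by omega)]
            simp only [gI] at hge
            simp [h2, hge, h4]
            omega
          · simp only [gI] at h4 h5 ⊢
            rw [if_pos h4, if_neg (show ¬ ((0:Int) + dct nums (i+1) (i+k) + 1 > 1) from by omega)]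
            simp only [gI] at hge
            simp [h2, hge, h4]
            omega
        · simp only [gI] at h4 ⊢
          rw [if_neg h4]
          simp only [gI] at hge
          simp [h2, hge, h4]
          omega
      · rw [if_neg (by simp [h2]; omega)]
        simp only [gI] at hge
        simp [h2, hge]
        intro _
        split_ifs <;> omega
    · rw [if_neg (by simp [h2])]
      simp [h2, hge]

lemma slice_eq_map (nums : List Int) (a b : Int) (ha : 0 ≤ a) (hab : a ≤ b)
    (hb : b ≤ (nums.length : Int)) :
    PySem.List.slice nums (some a) (some b)
      = (PySem.List.pyRange a b 1).map (fun j => gI nums j) := by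
  rw [show PySem.List.slice nums (some a) (some b) = (nums.drop a.toNat).take (b.toNat - a.toNat)
    from PySem.List.slice_toNat nums (by omega) (by omega)]
  apply List.ext_getElem
  · simp [PySem.List.length_pyRange_one]
    omega
  · intro n h1 h2
    simp only [List.getElem_take, List.getElem_drop, List.getElem_map]
    rw [PySem.List.getElem_pyRange_one]
    simp only [gI]
    have hcast : a + (n:Int) = ((a.toNat + n : Nat) : Int) := by omega
    rw [hcast, PySem.List.pyGetD_natCast]
    have hlt : a.toNat + n < nums.length := by
      simp [PySem.List.length_pyRange_one] at h2; omega
    rw [List.getD_eq_getElem _ _ hlt]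

lemma foldl_min_lt (t : List Int) : ∀ (x p : Int), (t.foldl min x < p) ↔ (x < p ∨ ∃ y ∈ t, y < p) := by
  induction t with
  | nil => simp
  | cons z t ih =>
    intro x p
    simp only [List.foldl_cons, ih (min x z) p, min_lt_iff, List.mem_cons]
    constructor
    · rintro (( h | h) | ⟨y, hy, hlt⟩)
      · exact Or.inl h
      · exact Or.inr ⟨z, Or.inl rfl, h⟩
      · exact Or.inr ⟨y, Or.inr hy, hlt⟩
    · rintro (h | ⟨y, (rfl | hy), hlt⟩)
      · exact Or.inl (Or.inl h)
      · exact Or.inl (Or.inr hlt)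
      · exact Or.inr ⟨y, hy, hlt⟩

lemma bDArr_invariant (nums : List Int) : ∀ (s : Nat), s ≤ nums.length →
    ((PySem.List.pyRange 1 (s:Int) 1).foldl (bDStep nums)
        (List.replicate (nums.length + 1) (0:Int))).length = nums.length + 1 ∧
    ∀ (m : Nat), m ≤ nums.length →
      ((PySem.List.pyRange 1 (s:Int) 1).foldl (bDStep nums)
        (List.replicate (nums.length + 1) (0:Int))).getD m 0
        = if (m:Int) ≤ max (s:Int) 1 then dct nums 1 (m:Int) else 0 := by
  intro s
  induction s with
  | zero =>
    intro _
    constructor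
    · simp only [Nat.cast_zero]
      simp [PySem.List.pyRange_one_eq_nil (by omega : (0:Int) ≤ 1)]
    · intro m hm
      simp only [Nat.cast_zero]
      rw [PySem.List.pyRange_one_eq_nil (by omega : (0:Int) ≤ 1)]
      simp only [List.foldl_nil]
      rw [List.getD_eq_getElem?_getD, List.getElem?_replicate]
      have hmlt : m < nums.length + 1 := by omega
      simp only [hmlt, if_true]
      by_cases hc : (m:Int) ≤ max (0:Int) 1
      · have hm1 : (m:Int) ≤ 1 := by simp at hc; omega
        rw [if_pos hc, dct_nil nums 1 (m:Int) (by omega)]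
        rfl
      · rw [if_neg hc]
        rfl
  | succ s ih =>
    intro hs1
    have ihh := ih (by omega)
    by_cases hs0 : s = 0
    · subst hs0
      have hnil : PySem.List.pyRange 1 ((1:Nat):Int) 1 = [] :=
        PySem.List.pyRange_one_eq_nil (by norm_num)
      rw [hnil]
      have hnil0 : PySem.List.pyRange 1 ((0:Nat):Int) 1 = [] :=
        PySem.List.pyRange_one_eq_nil (by norm_num)
      rw [hnil0] at ihh
      constructor
      · exact ihh.1
      · intro m hm
        rw [ihh.2 m hm]
        norm_num
    · -- s ≥ 1
      have hs : 1 ≤ s := by omega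
      have hsplit : PySem.List.pyRange 1 (((s+1:Nat)):Int) 1
          = PySem.List.pyRange 1 ((s:Nat):Int) 1 ++ [((s:Nat):Int)] := by
        push_cast
        exact PySem.List.pyRange_one_succ_right (show (1:Int) ≤ (s:Int) from by exact_mod_cast hs)
      rw [hsplit, List.foldl_append]
      set Dp := (PySem.List.pyRange 1 ((s:Nat):Int) 1).foldl (bDStep nums)
        (List.replicate (nums.length + 1) (0:Int)) with hDp
      simp only [List.foldl_cons, List.foldl_nil]
      have hset : bDStep nums Dp (s:Int) = Dp.set (s+1)
          (PySem.List.pyGetD Dp (s:Int) 0 +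
            (if PySem.List.pyGetD nums (s:Int) 0 < PySem.List.pyGetD nums ((s:Int)-1) 0 then 1 else 0)) := by
        rw [bDStep]
        rw [show ((s:Int)+1) = (((s+1:Nat)):Int) from by push_cast; ring]
        rw [PySem.List.pySetD_natCast]
      rw [hset]
      have hget : PySem.List.pyGetD Dp (s:Int) 0 = dct nums 1 (s:Int) := by
        rw [PySem.List.pyGetD_natCast]
        rw [ihh.2 s (by omega)]
        rw [if_pos (by simp [le_max_iff])]
      have hval : PySem.List.pyGetD Dp (s:Int) 0 +
            (if PySem.List.pyGetD nums (s:Int) 0 < PySem.List.pyGetD nums ((s:Int)-1) 0 then 1 else 0)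
          = dct nums 1 ((s:Int)+1) := by
        rw [hget, dct_split nums 1 (s:Int) ((s:Int)+1) (by exact_mod_cast hs) (by omega),
          dct_cons nums (s:Int) ((s:Int)+1) (by omega),
          dct_nil nums ((s:Int)+1) ((s:Int)+1) le_rfl]
        simp [gI]
        try ring
      rw [hval]
      constructor
      · rw [List.length_set]
        exact ihh.1
      · intro m hm
        rw [List.getD_eq_getElem?_getD, List.getElem?_set]
        by_cases hms : s + 1 = m
        · subst hms
          rw [if_pos rfl, if_pos (by rw [ihh.1]; omega)]
          simp only [Option.getD_some]
          rw [if_pos (by push_cast; simp [le_max_iff])]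
          try push_cast
          try rfl
        · rw [if_neg hms, ← List.getD_eq_getElem?_getD, ihh.2 m hm]
          have : ((m:Int) ≤ max ((s:Nat):Int) 1) ↔ ((m:Int) ≤ max (((s+1:Nat)):Int) 1) := by
            push_cast
            simp [le_max_iff]
            omega
          by_cases hc : (m:Int) ≤ max ((s:Nat):Int) 1
          · rw [if_pos hc, if_pos (this.mp hc)]
          · rw [if_neg hc, if_neg (fun h => hc (this.mpr h))]

lemma bDArr_get (nums : List Int) (m : Int) (h0 : 0 ≤ m) (hm : m ≤ (nums.length : Int)) :
    PySem.List.pyGetD (bDArr nums) m 0 = dct nums 1 m := by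
  have hinv := (bDArr_invariant nums nums.length le_rfl).2 m.toNat (by omega)
  rw [bDArr]
  rw [show PySem.List.len nums = ((nums.length : Nat) : Int) from by simp [PySem.List.len_eq]]
  rw [show m = ((m.toNat : Nat) : Int) from by omega, PySem.List.pyGetD_natCast]
  rw [hinv]
  rw [if_pos (by simp only [le_max_iff]; omega)]

lemma bStep_char (nums : List Int) (k prev i : Int) (hk : 1 ≤ k) (hi : 0 ≤ i)
    (hik : i + k ≤ (nums.length : Int)) :
    bBlockStep nums (bDArr nums) k (some prev) i =
      if allGe nums prev i (i+k) &&
         decide (dct nums (i+1) (i+k) +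
           (if gI nums i < gI nums (i+k-1) then 1 else 0) ≤ 1)
      then some (mxR nums (i+1) (i+k) (gI nums i)) else none := by
  have hblock : PySem.List.slice nums (some i) (some (i+k))
      = gI nums i :: (PySem.List.pyRange (i+1) (i+k) 1).map (fun j => gI nums j) := by
    rw [slice_eq_map nums i (i+k) hi (by omega) hik, PySem.List.pyRange_one_cons (by omega)]
    rfl
  simp only [bBlockStep, hblock]
  rw [PySem.List.min?_id_cons, PySem.List.max?_id_cons]
  simp only [Option.getD_some]
  rw [bDArr_get nums (i+k) (by omega) (by omega),
      bDArr_get nums (i+1) (by omega) (by omega)]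
  have hdd : dct nums 1 (i+k) - dct nums 1 (i+1) = dct nums (i+1) (i+k) := by
    rw [dct_split nums 1 (i+1) (i+k) (by omega) (by omega)]; ring
  rw [hdd]
  have hmax : ((PySem.List.pyRange (i+1) (i+k) 1).map (fun j => gI nums j)).foldl max (gI nums i)
      = mxR nums (i+1) (i+k) (gI nums i) := by
    rw [List.foldl_map]; rfl
  have hminiff : (((PySem.List.pyRange (i+1) (i+k) 1).map (fun j => gI nums j)).foldl min (gI nums i) < prev)
      ↔ ¬ (allGe nums prev i (i+k) = true) := by
    rw [foldl_min_lt, allGe_cons nums prev i (i+k) (by omega)]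
    simp [allGe, not_and_or, not_le]
    constructor
    · rintro (h | ⟨a, ⟨ha1, ha2⟩, ha3⟩) hle
      · exact absurd hle (by omega)
      · exact ⟨a, ha1, ha2, ha3⟩
    · intro h
      by_cases hle : prev ≤ gI nums i
      · obtain ⟨x, hx1, hx2, hx3⟩ := h hle
        exact Or.inr ⟨x, ⟨hx1, hx2⟩, hx3⟩
      · exact Or.inl (by omega)
  by_cases hA : allGe nums prev i (i+k) = true
  · rw [if_neg (by rw [hminiff]; simp [hA]), hmax]
    by_cases hW : PySem.List.pyGetD nums i 0 < PySem.List.pyGetD nums (i+k-1) 0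
    · have hW' : gI nums i < gI nums (i+k-1) := hW
      by_cases hC : dct nums (i+1) (i+k) + 1 ≤ 1
      · rw [if_neg (by rw [if_pos hW]; omega)]
        rw [if_pos (by simp [hA, hW', hC])]
      · rw [if_pos (by rw [if_pos hW]; omega)]
        rw [if_neg (by simp [hA, hW']; omega)]
    · have hW' : ¬ gI nums i < gI nums (i+k-1) := hW
      by_cases hC : dct nums (i+1) (i+k) ≤ 1
      · rw [if_neg (by rw [if_neg hW]; omega)]
        rw [if_pos (by simp [hA, hW', hC])]
      · rw [if_pos (by rw [if_neg hW]; omega)]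
        rw [if_neg (by simp [hA, hW']; omega)]
  · rw [if_pos (hminiff.mpr hA)]
    rw [if_neg (by simp [hA])]

lemma check_eq_ok (nums : List Int) (k : Int) (hk : 1 ≤ k) (hdvd : k ∣ (nums.length : Int)) :
    aCheck nums k = bOk nums (bDArr nums) k := by
  unfold aCheck bOk
  congr 1
  apply PySem.List.foldl_congr_mem
  intro st i hi
  rw [PySem.List.mem_pyRange_iff_of_pos (by omega : (0:Int) < k) i] at hi
  rw [PySem.List.len_eq] at hi
  obtain ⟨hi0, hilt, c, hc⟩ := hi
  have hik : i + k ≤ (nums.length : Int) := by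
    have hd2 : k ∣ ((nums.length : Int) - i) := by
      refine dvd_sub hdvd ⟨c, by omega⟩
    have := Int.le_of_dvd (by omega) hd2
    omega
  match st with
  | none => rfl
  | some mini =>
    rw [aStep_char nums k mini i hk, bStep_char nums k mini i hk hi0 hik]

theorem final_eq (nums : List Int) :
    (PySem.List.pyRange 1 (PySem.List.len nums + 1) 1).foldl
      (fun count k => if PySem.Int.mod (PySem.List.len nums) k == 0 && aCheck nums k
        then count + k else count) 0 =
    (PySem.List.pyRange 1 (PySem.List.len nums + 1) 1).foldl
      (fun acc k => if PySem.Int.mod (PySem.List.len nums) k == 0 && bOk nums (bDArr nums) k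
        then acc + k else acc) 0 := by
  apply PySem.List.foldl_congr_mem
  intro acc k hkmem
  rw [PySem.List.mem_pyRange_one] at hkmem
  by_cases hmod : PySem.Int.mod (PySem.List.len nums) k = 0
  · have hdvd : k ∣ (nums.length : Int) := by
      rw [← PySem.Int.mod_eq_zero_iff_dvd]
      rw [PySem.List.len_eq] at hmod
      exact hmod
    rw [check_eq_ok nums k (by omega) hdvd]
  · have hf : (PySem.Int.mod (PySem.List.len nums) k == 0) = false := by
      rw [PySem.List.len_eq] at hmod
      simp [PySem.List.len_eq, hmod]
    rw [hf]
    simp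

-- ===== VERDICT (by name: the statement is the Claim_ definition above) =====
theorem sortableIntegers_spec : Claim_equal_sortableIntegers := by
  intro nums _
  unfold Spec_sortableIntegers
  show sortableIntegers nums = sortableIntegers_alt nums
  exact final_eq nums
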